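-- pv_equiv track=rewrite | github.com/gyrogovernance/superintelligence | src/tools/gyrograph/ops.py | _py_mask12_for_byte
-- ===== SOURCE A (Python) =====
-- def _py_mask12_for_byte(byte: int) -> int:
--     intron = (int(byte) & 0xFF) ^ 0xAA
--     micro = (intron >> 1) & 0x3F
--     mask12 = 0
--     for i in range(6):
--         if (micro >> i) & 1:
--             mask12 |= 0x3 << (2 * i)
--     return mask12 & 0xFFF
-- ===== SOURCE B (Python) =====
-- def _py_mask12_for_byte(byte: int) -> int:
--     intron = (int(byte) & 0xFF) ^ 0xAA
--     micro = (intron >> 1) & 0x3F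
--     # branch-free parallel bit-spread: place bit i of micro at position 2*i
--     x = (micro | (micro << 3)) & 0x1C7
--     x = (x | (x << 2)) & 0x4D3
--     x = (x | (x << 1)) & 0x555
--     return (x | (x << 1)) & 0xFFF
-- ===== Notes on version B (the rewrite author's own statement) =====
-- stated objective: idiomatic
-- what changed: Replaces A's per-bit loop over the six bits of micro (test a bit, OR a two-bit pair into the mask) with a branch-free closed-form shift-and-mask parallel bit-spread followed by a single doubling OR.
import Mathlib
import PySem

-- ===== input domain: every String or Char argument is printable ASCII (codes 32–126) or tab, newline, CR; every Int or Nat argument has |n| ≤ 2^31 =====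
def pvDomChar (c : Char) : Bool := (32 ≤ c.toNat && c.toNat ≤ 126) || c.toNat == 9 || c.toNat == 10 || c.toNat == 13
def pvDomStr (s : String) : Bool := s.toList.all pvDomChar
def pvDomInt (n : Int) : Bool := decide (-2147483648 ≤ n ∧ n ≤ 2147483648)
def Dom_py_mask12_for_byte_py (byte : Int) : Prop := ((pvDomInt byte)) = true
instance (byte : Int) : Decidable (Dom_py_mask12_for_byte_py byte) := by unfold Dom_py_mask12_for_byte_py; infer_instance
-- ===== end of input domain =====

-- B replaces A's 6-iteration per-bit loop by a branch-free closed-form shift/mask bit-spread (same cost class; objective: idiomatic/alternative).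

-- ===== PORT A =====
def py_mask12_for_byte_py (byte : Int) : Int :=
  let intron := PySem.Int.bxor (PySem.Int.band byte 0xFF) 0xAA
  let micro := PySem.Int.band (intron >>> 1) 0x3F
  let mask12 := (PySem.List.pyRange 0 6 1).foldl
    (fun mask12 i =>
      -- i ranges over 0..5, so i.toNat is exact for Python's 'micro >> i' / '0x3 << (2*i)'
      if PySem.Int.band (micro >>> i.toNat) 1 ≠ 0 then
        PySem.Int.bor mask12 (0x3 <<< (2 * i).toNat)
      else mask12) 0
  PySem.Int.band mask12 0xFFF

-- ===== PORT B =====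
def py_mask12_for_byte_py_alt (byte : Int) : Int :=
  let intron := PySem.Int.bxor (PySem.Int.band byte 0xFF) 0xAA
  let micro := PySem.Int.band (intron >>> 1) 0x3F
  let x1 := PySem.Int.band (PySem.Int.bor micro (micro <<< 3)) 0x1C7
  let x2 := PySem.Int.band (PySem.Int.bor x1 (x1 <<< 2)) 0x4D3
  let x3 := PySem.Int.band (PySem.Int.bor x2 (x2 <<< 1)) 0x555
  PySem.Int.band (PySem.Int.bor x3 (x3 <<< 1)) 0xFFF

-- ===== PRECONDITION & SPEC =====
def Spec_py_mask12_for_byte_py (byte : Int) (out : Int) : Prop := out = py_mask12_for_byte_py_alt byte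
instance (byte : Int) (out : Int) : Decidable (Spec_py_mask12_for_byte_py byte out) := by unfold Spec_py_mask12_for_byte_py; infer_instance

-- ===== CLAIM (what is proved, stated in full; the proofs are below) =====
def Claim_equal_py_mask12_for_byte_py : Prop := ∀ (byte : Int), Dom_py_mask12_for_byte_py byte → Spec_py_mask12_for_byte_py byte (py_mask12_for_byte_py byte)

-- ===== LEMMAS AND PROOFS =====

-- A's tail (the 6-iteration loop plus final mask), as a function of micro
def pvTailA (micro : Int) : Int :=
  PySem.Int.band
    ((PySem.List.pyRange 0 6 1).foldl
      (fun mask12 i =>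
        if PySem.Int.band (micro >>> i.toNat) 1 ≠ 0 then
          PySem.Int.bor mask12 (0x3 <<< (2 * i).toNat)
        else mask12) 0) 0xFFF

-- B's tail (the closed-form bit-spread), as a function of micro
def pvTailB (micro : Int) : Int :=
  let x1 := PySem.Int.band (PySem.Int.bor micro (micro <<< 3)) 0x1C7
  let x2 := PySem.Int.band (PySem.Int.bor x1 (x1 <<< 2)) 0x4D3
  let x3 := PySem.Int.band (PySem.Int.bor x2 (x2 <<< 1)) 0x555
  PySem.Int.band (PySem.Int.bor x3 (x3 <<< 1)) 0xFFF

lemma pvTails_fin : ∀ n : Fin 64, pvTailA (n : Int) = pvTailB (n : Int) := by decide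

lemma pvBand63_bounds (y : Int) : 0 ≤ PySem.Int.band y 63 ∧ PySem.Int.band y 63 ≤ 63 := by
  unfold PySem.Int.band
  have hand : y.toNat &&& 63 ≤ 63 := le_trans Nat.and_le_right (by norm_num)
  split_ifs with h1 h2 h2 <;> constructor <;> push_cast <;> omega

lemma pvTails_eq (y : Int) : pvTailA (PySem.Int.band y 63) = pvTailB (PySem.Int.band y 63) := by
  obtain ⟨h0, h1⟩ := pvBand63_bounds y
  have hlt : (PySem.Int.band y 63).toNat < 64 := by omega
  have hcast : ((⟨(PySem.Int.band y 63).toNat, hlt⟩ : Fin 64) : Int) = PySem.Int.band y 63 := by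
    simp [Int.toNat_of_nonneg h0]
  have := pvTails_fin ⟨(PySem.Int.band y 63).toNat, hlt⟩
  rwa [hcast] at this

-- ===== VERDICT (by name: the statement is the Claim_ definition above) =====
theorem py_mask12_for_byte_py_spec : Claim_equal_py_mask12_for_byte_py := by
  intro byte _
  unfold Spec_py_mask12_for_byte_py
  exact pvTails_eq ((PySem.Int.bxor (PySem.Int.band byte 0xFF) 0xAA) >>> 1)
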